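-- pv_equiv track=rewrite | github.com/kungminno/programmers | algorithm/algorithm_62.py | solution
-- ===== SOURCE A (Python) =====
-- def solution(babbling):
--     answer = 0
--
--     for b in babbling:
--         word,final = "", ""
--         if "ayaaya" in b or "yeye" in b or "woowoo" in b or "mama" in b:
--             continue
--         else:
--             for w in b:
--                 word += w
--                 if word in ["aya", "ye", "woo", "ma"]:
--                     final += word
--                     word = ""
--
--             if final == b:
--                 answer += 1
--
--     return answer
-- ===== SOURCE B (Python) =====
-- def _ok(b):
--     if "ayaaya" in b or "yeye" in b or "woowoo" in b or "mama" in b: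
--         return False
--     i, n = 0, len(b)
--     while i < n:
--         if b.startswith("aya", i):
--             i += 3
--         elif b.startswith("ye", i):
--             i += 2
--         elif b.startswith("woo", i):
--             i += 3
--         elif b.startswith("ma", i):
--             i += 2
--         else:
--             break
--     return i == n
--
-- def solution(babbling):
--     return sum(1 for b in babbling if _ok(b))
-- ===== Notes on version B (the rewrite author's own statement) =====
-- stated objective: idiomatic
-- what changed: Replaces A's char-by-char state machine (accumulating 'word' and rebuilding 'final' for comparison with b) by direct index-based prefix stripping of whole syllables with startswith, and the counting loop by sum over a predicate.
import Mathlib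
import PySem

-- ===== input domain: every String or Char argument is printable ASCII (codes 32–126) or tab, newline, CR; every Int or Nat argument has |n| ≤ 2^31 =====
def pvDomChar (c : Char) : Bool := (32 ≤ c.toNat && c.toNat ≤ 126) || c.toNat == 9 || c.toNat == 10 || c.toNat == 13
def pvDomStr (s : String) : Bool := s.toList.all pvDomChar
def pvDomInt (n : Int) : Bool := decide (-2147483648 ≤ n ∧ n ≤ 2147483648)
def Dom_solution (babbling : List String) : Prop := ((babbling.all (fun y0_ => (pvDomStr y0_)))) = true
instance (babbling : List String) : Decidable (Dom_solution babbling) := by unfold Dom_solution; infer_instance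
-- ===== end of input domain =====

-- B replaces A's char-by-char greedy state machine by whole-syllable prefix stripping; same cost, plainer code.

-- ===== PORT A =====
-- the four allowed syllables, as the Python list ["aya", "ye", "woo", "ma"] (strings as char lists)
def sylls : List (List Char) := [['a','y','a'], ['y','e'], ['w','o','o'], ['m','a']]

-- one step of A's inner 'for w in b' loop over the state (word, final)
def stepA (st : List Char × List Char) (w : Char) : List Char × List Char :=
  let word := st.1 ++ [w]
  if word ∈ sylls then ([], st.2 ++ word) else (word, st.2)

def solution (babbling : List String) : Int :=
  babbling.foldl (fun answer b =>
    if PySem.Str.isIn "ayaaya" b || PySem.Str.isIn "yeye" b ||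
       PySem.Str.isIn "woowoo" b || PySem.Str.isIn "mama" b then
      answer
    else
      let st := b.toList.foldl stepA ([], [])
      if st.2 = b.toList then answer + 1 else answer) 0

-- ===== PORT B =====
-- B's 'while i < n' prefix-stripping loop, as recursion on the remaining suffix (b.startswith(syl, i) = startswith on the drop)
def bLoop (s : List Char) : Bool :=
  if h : s = [] then true
  else if PySem.Chars.startswith s ['a','y','a'] then bLoop (s.drop 3)
  else if PySem.Chars.startswith s ['y','e'] then bLoop (s.drop 2)
  else if PySem.Chars.startswith s ['w','o','o'] then bLoop (s.drop 3)
  else if PySem.Chars.startswith s ['m','a'] then bLoop (s.drop 2)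
  else false
termination_by s.length
decreasing_by
  all_goals (have h0 : s.length ≠ 0 := fun hh => h (List.eq_nil_of_length_eq_zero hh);
             simp only [List.length_drop]; omega)

def okB (b : String) : Bool :=
  if PySem.Str.isIn "ayaaya" b || PySem.Str.isIn "yeye" b ||
     PySem.Str.isIn "woowoo" b || PySem.Str.isIn "mama" b then
    false
  else bLoop b.toList

def solution_alt (babbling : List String) : Int := (babbling.countP okB : Int)

-- ===== PRECONDITION & SPEC =====
def Spec_solution (babbling : List String) (out : Int) : Prop := out = solution_alt babbling
instance (babbling : List String) (out : Int) : Decidable (Spec_solution babbling out) := by unfold Spec_solution; infer_instance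

-- ===== CLAIM (what is proved, stated in full; the proofs are below) =====
def Claim_equal_solution : Prop := ∀ (babbling : List String), Dom_solution babbling → Spec_solution babbling (solution babbling)

-- ===== LEMMAS AND PROOFS =====

-- invariant of A's inner loop: final ++ word = consumed input
theorem invA (cs : List Char) : ∀ st : List Char × List Char,
    (cs.foldl stepA st).2 ++ (cs.foldl stepA st).1 = st.2 ++ st.1 ++ cs := by
  induction cs with
  | nil => intro st; simp
  | cons c rest ih =>
    intro st
    simp only [List.foldl_cons, stepA]
    split
    · rw [ih]; simp
    · rw [ih]; simp

-- once 'word' is nonempty and no extension of it is a syllable, it stays that way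
theorem deadA (cs : List Char) : ∀ (w f : List Char), w ≠ [] → (∀ v, w ++ v ∉ sylls) →
    (cs.foldl stepA (w, f)).1 = w ++ cs := by
  induction cs with
  | nil => intro w f hw hd; simp
  | cons c rest ih =>
    intro w f hw hd
    simp only [List.foldl_cons, stepA]
    have hns : w ++ [c] ∉ sylls := hd [c]
    simp only [hns, if_false]
    rw [ih (w ++ [c]) f (by simp) (fun v => by rw [List.append_assoc]; exact hd _)]
    simp

-- states of A's 'word' that no continuation can ever complete to a syllable
theorem dead_other (c : Char) (h1 : c ≠ 'a') (h2 : c ≠ 'y') (h3 : c ≠ 'w') (h4 : c ≠ 'm') :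
    ∀ v, (c :: v) ∉ sylls := by
  intro v hv; simp [sylls] at hv; rcases hv with hv|hv|hv|hv <;> simp_all

theorem dead_ac (c2 : Char) (h : c2 ≠ 'y') : ∀ v, ('a' :: c2 :: v) ∉ sylls := by
  intro v hv; simp [sylls] at hv; rcases hv with hv|hv|hv|hv <;> simp_all

theorem dead_ayc (c3 : Char) (h : c3 ≠ 'a') : ∀ v, ('a' :: 'y' :: c3 :: v) ∉ sylls := by
  intro v hv; simp [sylls] at hv; rcases hv with hv|hv|hv|hv <;> simp_all

theorem dead_yc (c2 : Char) (h : c2 ≠ 'e') : ∀ v, ('y' :: c2 :: v) ∉ sylls := by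
  intro v hv; simp [sylls] at hv; rcases hv with hv|hv|hv|hv <;> simp_all

theorem dead_wc (c2 : Char) (h : c2 ≠ 'o') : ∀ v, ('w' :: c2 :: v) ∉ sylls := by
  intro v hv; simp [sylls] at hv; rcases hv with hv|hv|hv|hv <;> simp_all

theorem dead_woc (c3 : Char) (h : c3 ≠ 'o') : ∀ v, ('w' :: 'o' :: c3 :: v) ∉ sylls := by
  intro v hv; simp [sylls] at hv; rcases hv with hv|hv|hv|hv <;> simp_all

theorem dead_mc (c2 : Char) (h : c2 ≠ 'a') : ∀ v, ('m' :: c2 :: v) ∉ sylls := by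
  intro v hv; simp [sylls] at hv; rcases hv with hv|hv|hv|hv <;> simp_all

theorem dead_run (w : List Char) (hw : w ≠ []) (hd : ∀ v, w ++ v ∉ sylls)
    (cs : List Char) (f : List Char) : (cs.foldl stepA (w, f)).1 ≠ [] := by
  rw [deadA cs w f hw hd]; simp [hw]

-- A's loop consumes one whole syllable from the empty-'word' state
theorem consume_aya (t f : List Char) :
    (('a' :: 'y' :: 'a' :: t).foldl stepA ([], f)) = t.foldl stepA ([], f ++ ['a','y','a']) := by
  simp only [List.foldl_cons, stepA]; simp [sylls]

theorem consume_ye (t f : List Char) :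
    (('y' :: 'e' :: t).foldl stepA ([], f)) = t.foldl stepA ([], f ++ ['y','e']) := by
  simp only [List.foldl_cons, stepA]; simp [sylls]

theorem consume_woo (t f : List Char) :
    (('w' :: 'o' :: 'o' :: t).foldl stepA ([], f)) = t.foldl stepA ([], f ++ ['w','o','o']) := by
  simp only [List.foldl_cons, stepA]; simp [sylls]

theorem consume_ma (t f : List Char) :
    (('m' :: 'a' :: t).foldl stepA ([], f)) = t.foldl stepA ([], f ++ ['m','a']) := by
  simp only [List.foldl_cons, stepA]; simp [sylls]

-- main: A's inner loop ends with empty 'word' iff B's prefix-stripping loop succeeds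
theorem mainA (cs : List Char) : ∀ f : List Char,
    ((cs.foldl stepA ([], f)).1 = []) ↔ bLoop cs = true := by
  fun_induction bLoop cs with
  | case1 => intro f; simp
  | case2 s h h1 ih =>
    obtain ⟨t, rfl⟩ := (PySem.Chars.startswith_iff s ['a','y','a']).mp h1
    intro f
    rw [show (['a','y','a'] ++ t : List Char) = 'a' :: 'y' :: 'a' :: t from rfl, consume_aya,
       show (List.drop 3 ('a' :: 'y' :: 'a' :: t) : List Char) = t from rfl]
    exact ih (f ++ ['a','y','a'])
  | case3 s h h1 h2 ih =>
    obtain ⟨t, rfl⟩ := (PySem.Chars.startswith_iff s ['y','e']).mp h2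
    intro f
    rw [show (['y','e'] ++ t : List Char) = 'y' :: 'e' :: t from rfl, consume_ye,
       show (List.drop 2 ('y' :: 'e' :: t) : List Char) = t from rfl]
    exact ih (f ++ ['y','e'])
  | case4 s h h1 h2 h3 ih =>
    obtain ⟨t, rfl⟩ := (PySem.Chars.startswith_iff s ['w','o','o']).mp h3
    intro f
    rw [show (['w','o','o'] ++ t : List Char) = 'w' :: 'o' :: 'o' :: t from rfl, consume_woo,
       show (List.drop 3 ('w' :: 'o' :: 'o' :: t) : List Char) = t from rfl]
    exact ih (f ++ ['w','o','o'])
  | case5 s h h1 h2 h3 h4 ih =>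
    obtain ⟨t, rfl⟩ := (PySem.Chars.startswith_iff s ['m','a']).mp h4
    intro f
    rw [show (['m','a'] ++ t : List Char) = 'm' :: 'a' :: t from rfl, consume_ma,
       show (List.drop 2 ('m' :: 'a' :: t) : List Char) = t from rfl]
    exact ih (f ++ ['m','a'])
  | case6 s h h1 h2 h3 h4 =>
    intro f
    simp only [Bool.false_eq_true, iff_false]
    obtain ⟨c, rest, rfl⟩ := List.exists_cons_of_ne_nil h
    by_cases hca : c = 'a'
    · subst hca
      match rest with
      | [] => simp [stepA, sylls]
      | c2 :: rest2 =>
        by_cases hcy : c2 = 'y'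
        · subst hcy
          match rest2 with
          | [] => simp [stepA, sylls]
          | c3 :: rest3 =>
            have hc3 : c3 ≠ 'a' := by
              intro hh; subst hh
              exact h1 ((PySem.Chars.startswith_iff _ _).mpr ⟨rest3, rfl⟩)
            have hstep : (('a' :: 'y' :: c3 :: rest3).foldl stepA ([], f)).1
                 = (rest3.foldl stepA (['a','y',c3], f)).1 := by
              simp only [List.foldl_cons, stepA]; simp [sylls, hc3]
            rw [hstep]
            exact dead_run _ (by simp) (dead_ayc c3 hc3) rest3 f
        · have hstep : (('a' :: c2 :: rest2).foldl stepA ([], f)).1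
               = (rest2.foldl stepA (['a', c2], f)).1 := by
            simp only [List.foldl_cons, stepA]; simp [sylls]
          rw [hstep]
          exact dead_run _ (by simp) (dead_ac c2 hcy) rest2 f
    · by_cases hcyy : c = 'y'
      · subst hcyy
        match rest with
        | [] => simp [stepA, sylls]
        | c2 :: rest2 =>
          have hc2 : c2 ≠ 'e' := by
            intro hh; subst hh
            exact h2 ((PySem.Chars.startswith_iff _ _).mpr ⟨rest2, rfl⟩)
          have hstep : (('y' :: c2 :: rest2).foldl stepA ([], f)).1
               = (rest2.foldl stepA (['y', c2], f)).1 := by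
            simp only [List.foldl_cons, stepA]; simp [sylls, hc2]
          rw [hstep]
          exact dead_run _ (by simp) (dead_yc c2 hc2) rest2 f
      · by_cases hcw : c = 'w'
        · subst hcw
          match rest with
          | [] => simp [stepA, sylls]
          | c2 :: rest2 =>
            by_cases hco : c2 = 'o'
            · subst hco
              match rest2 with
              | [] => simp [stepA, sylls]
              | c3 :: rest3 =>
                have hc3 : c3 ≠ 'o' := by
                  intro hh; subst hh
                  exact h3 ((PySem.Chars.startswith_iff _ _).mpr ⟨rest3, rfl⟩)
                have hstep : (('w' :: 'o' :: c3 :: rest3).foldl stepA ([], f)).1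
                     = (rest3.foldl stepA (['w','o',c3], f)).1 := by
                  simp only [List.foldl_cons, stepA]; simp [sylls, hc3]
                rw [hstep]
                exact dead_run _ (by simp) (dead_woc c3 hc3) rest3 f
            · have hstep : (('w' :: c2 :: rest2).foldl stepA ([], f)).1
                   = (rest2.foldl stepA (['w', c2], f)).1 := by
                simp only [List.foldl_cons, stepA]; simp [sylls, hco]
              rw [hstep]
              exact dead_run _ (by simp) (dead_wc c2 hco) rest2 f
        · by_cases hcm : c = 'm'
          · subst hcm
            match rest with
            | [] => simp [stepA, sylls]
            | c2 :: rest2 =>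
              have hc2 : c2 ≠ 'a' := by
                intro hh; subst hh
                exact h4 ((PySem.Chars.startswith_iff _ _).mpr ⟨rest2, rfl⟩)
              have hstep : (('m' :: c2 :: rest2).foldl stepA ([], f)).1
                   = (rest2.foldl stepA (['m', c2], f)).1 := by
                simp only [List.foldl_cons, stepA]; simp [sylls, hc2]
              rw [hstep]
              exact dead_run _ (by simp) (dead_mc c2 hc2) rest2 f
          · have hstep : ((c :: rest).foldl stepA ([], f)).1
                 = (rest.foldl stepA ([c], f)).1 := by
              simp only [List.foldl_cons, stepA]; simp [sylls, hca, hcyy, hcw, hcm]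
            rw [hstep]
            exact dead_run _ (by simp) (dead_other c hca hcyy hcw hcm) rest f

-- the two loop bodies agree on every string
theorem body_eq (acc : Int) (b : String) :
    (if PySem.Str.isIn "ayaaya" b || PySem.Str.isIn "yeye" b ||
        PySem.Str.isIn "woowoo" b || PySem.Str.isIn "mama" b then acc
     else
       let st := b.toList.foldl stepA ([], [])
       if st.2 = b.toList then acc + 1 else acc)
    = if okB b = true then acc + 1 else acc := by
  by_cases hp : (PySem.Str.isIn "ayaaya" b || PySem.Str.isIn "yeye" b ||
      PySem.Str.isIn "woowoo" b || PySem.Str.isIn "mama" b) = true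
  · have hok : okB b = false := by unfold okB; rw [if_pos hp]
    rw [if_pos hp, hok]; simp
  · have hok : okB b = bLoop b.toList := by unfold okB; rw [if_neg hp]
    rw [if_neg hp, hok]
    show (if (b.toList.foldl stepA ([], [])).2 = b.toList then acc + 1 else acc) = _
    have hinv := invA b.toList ([], [])
    simp only [List.append_nil, List.nil_append] at hinv
    have h2 : ((b.toList.foldl stepA ([], [])).2 = b.toList)
            ↔ ((b.toList.foldl stepA ([], [])).1 = []) := by
      constructor
      · intro he; rw [he] at hinv
        exact List.append_cancel_left (hinv.trans (List.append_nil _).symm)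
      · intro he; rw [he] at hinv; simpa using hinv
    rw [if_congr (h2.trans (mainA b.toList [])) rfl rfl]

-- ===== VERDICT (by name: the statement is the Claim_ definition above) =====
theorem solution_spec : Claim_equal_solution := by
  intro babbling _
  unfold Spec_solution solution solution_alt
  rw [show (fun (answer : Int) (b : String) =>
        if PySem.Str.isIn "ayaaya" b || PySem.Str.isIn "yeye" b ||
           PySem.Str.isIn "woowoo" b || PySem.Str.isIn "mama" b then answer
        else
          let st := b.toList.foldl stepA ([], [])
          if st.2 = b.toList then answer + 1 else answer)
      = (fun (acc : Int) (b : String) => if okB b = true then acc + 1 else acc) from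
      funext fun acc => funext fun b => body_eq acc b]
  rw [PySem.List.foldl_if_add_one okB babbling 0]
  simp
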